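-- pv_equiv track=rewrite | github.com/TriguiMohamedYassine/MA-RAGTes | src/agents/generator.py | _normalize_ethers_v6
-- ===== SOURCE A (Python) =====
-- def _normalize_ethers_v6(code: str) -> str:
--     if not code:
--         return code
--     replacements = {
--         "ethers.utils.parseEther(":  "ethers.parseEther(",
--         "ethers.utils.formatEther(": "ethers.formatEther(",
--         "ethers.utils.parseUnits(":  "ethers.parseUnits(",
--         "ethers.utils.formatUnits(": "ethers.formatUnits(",
--         ".deployed()":               ".waitForDeployment()",
--     }
--     for old, new in replacements.items():
--         code = code.replace(old, new)
--     return code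
-- ===== SOURCE B (Python) =====
-- def _normalize_ethers_v6(code: str) -> str:
--     if not code:
--         return code
--     rules = [
--         ("ethers.utils.parseEther(",  "ethers.parseEther("),
--         ("ethers.utils.formatEther(", "ethers.formatEther("),
--         ("ethers.utils.parseUnits(",  "ethers.parseUnits("),
--         ("ethers.utils.formatUnits(", "ethers.formatUnits("),
--         (".deployed()",               ".waitForDeployment()"),
--     ]
--     out = []
--     i = 0
--     n = len(code)
--     while i < n:
--         for old, new in rules:
--             if code.startswith(old, i):
--                 out.append(new)
--                 i += len(old)
--                 break
--         else:
--             out.append(code[i])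
--             i += 1
--     return "".join(out)
-- ===== Notes on version B (the rewrite author's own statement) =====
-- stated objective: alternative
-- what changed: Replaces five sequential full-string str.replace passes by one left-to-right scan that at each position tries all five patterns with first-match-wins and copies or substitutes as it goes.
import Mathlib
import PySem

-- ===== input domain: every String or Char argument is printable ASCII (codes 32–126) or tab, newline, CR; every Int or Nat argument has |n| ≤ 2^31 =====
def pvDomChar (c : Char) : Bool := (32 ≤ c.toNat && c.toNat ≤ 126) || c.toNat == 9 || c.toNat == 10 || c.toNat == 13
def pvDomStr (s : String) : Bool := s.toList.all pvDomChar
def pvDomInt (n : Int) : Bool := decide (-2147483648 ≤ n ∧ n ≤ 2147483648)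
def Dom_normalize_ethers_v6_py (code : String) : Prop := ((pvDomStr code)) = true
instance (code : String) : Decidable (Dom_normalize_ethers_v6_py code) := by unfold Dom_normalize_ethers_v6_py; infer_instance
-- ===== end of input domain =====

-- B replaces A's five sequential full-string replace passes by one left-to-right scan that tries
-- all five patterns at each position (first match wins); an alternative algorithm, not claimed faster.

-- ===== PORT A =====
-- the dict literal `replacements` (association list in insertion order)
def pvReplacements : List (String × String) :=
  [("ethers.utils.parseEther(",  "ethers.parseEther("),
   ("ethers.utils.formatEther(", "ethers.formatEther("),
   ("ethers.utils.parseUnits(",  "ethers.parseUnits("),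
   ("ethers.utils.formatUnits(", "ethers.formatUnits("),
   (".deployed()",               ".waitForDeployment()")]

def normalize_ethers_v6_py (code : String) : String :=
  if code = "" then code
  else pvReplacements.foldl (fun c p => PySem.Str.replace c p.1 p.2) code

-- ===== PORT B =====
-- Source B's rules list, on char lists
def pvRules : List (List Char × List Char) :=
  [("ethers.utils.parseEther(".toList,  "ethers.parseEther(".toList),
   ("ethers.utils.formatEther(".toList, "ethers.formatEther(".toList),
   ("ethers.utils.parseUnits(".toList,  "ethers.parseUnits(".toList),
   ("ethers.utils.formatUnits(".toList, "ethers.formatUnits(".toList),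
   (".deployed()".toList,               ".waitForDeployment()".toList)]

-- Source B's while loop: at each position try the rules in order (for … break / else), emit the
-- replacement and jump over the matched pattern, otherwise copy one character.
-- (`!p.1.isEmpty` only makes the recursion total; every rule pattern is nonempty.)
def pvScan (rules : List (List Char × List Char)) (cs : List Char) : List Char :=
  match cs with
  | [] => []
  | c :: t =>
    match hf : rules.find? (fun p => !p.1.isEmpty && p.1.isPrefixOf (c :: t)) with
    | some p => p.2 ++ pvScan rules ((c :: t).drop p.1.length)
    | none => c :: pvScan rules t
termination_by cs.length
decreasing_by
  · have hp := List.find?_some hf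
    simp only [Bool.and_eq_true, Bool.not_eq_eq_eq_not, Bool.not_true, List.isEmpty_eq_false_iff,
      List.isPrefixOf_iff_prefix] at hp
    have h1 : 1 ≤ p.1.length := by
      cases hq : p.1 with
      | nil => exact absurd hq hp.1
      | cons a l => simp
    simp only [List.length_drop, List.length_cons]
    omega
  · simp

def normalize_ethers_v6_py_alt (code : String) : String :=
  if code = "" then code
  else String.ofList (pvScan pvRules code.toList)

-- ===== PRECONDITION & SPEC =====
def Spec_normalize_ethers_v6_py (code : String) (out : String) : Prop := out = normalize_ethers_v6_py_alt code
instance (code : String) (out : String) : Decidable (Spec_normalize_ethers_v6_py code out) := by unfold Spec_normalize_ethers_v6_py; infer_instance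

-- ===== CLAIM (what is proved, stated in full; the proofs are below) =====
def Claim_equal_normalize_ethers_v6_py : Prop := ∀ (code : String), Dom_normalize_ethers_v6_py code → Spec_normalize_ethers_v6_py code (normalize_ethers_v6_py code)

-- ===== LEMMAS AND PROOFS =====

-- prefix compatibility: one of the two is a prefix of the other
def pvCompat (a b : List Char) : Prop := a <+: b ∨ b <+: a

lemma pv_prefix_append_cases (a s X : List Char) (h : a <+: s ++ X) : pvCompat a s := by
  obtain ⟨t, ht⟩ := h
  rcases List.append_eq_append_iff.mp ht with ⟨a', ha, _⟩ | ⟨c, hc, _⟩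
  · exact Or.inl ⟨a', ha.symm⟩
  · exact Or.inr ⟨c, hc.symm⟩

lemma pv_find?_pos (pred : List Char × List Char → Bool) (q : List Char × List Char)
    (l : List (List Char × List Char)) (h : pred q = true) : (q :: l).find? pred = some q := by
  simp [h]

-- one-step unfolding of pvScan
lemma pvScan_eq_some (rules : List (List Char × List Char)) (cs : List Char)
    (p : List Char × List Char)
    (h : rules.find? (fun p => !p.1.isEmpty && p.1.isPrefixOf cs) = some p) :
    pvScan rules cs = p.2 ++ pvScan rules (cs.drop p.1.length) := by
  match cs with
  | [] =>
    exfalso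
    have hp := List.find?_some h
    simp only [Bool.and_eq_true, Bool.not_eq_eq_eq_not, Bool.not_true, List.isEmpty_eq_false_iff,
      List.isPrefixOf_iff_prefix] at hp
    exact hp.1 (List.prefix_nil.mp hp.2)
  | c :: t =>
    rw [pvScan]
    split <;> simp_all

lemma pvScan_cons_none (rules : List (List Char × List Char)) (c : Char) (t : List Char)
    (h : rules.find? (fun p => !p.1.isEmpty && p.1.isPrefixOf (c :: t)) = none) :
    pvScan rules (c :: t) = c :: pvScan rules t := by
  rw [pvScan]
  split <;> simp_all

lemma pvScan_nil (rules : List (List Char × List Char)) : pvScan rules [] = [] := by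
  rw [pvScan]

-- a block none of whose alignments is compatible with any rule pattern is copied verbatim
lemma pvScan_block (rules : List (List Char × List Char)) (block : List Char)
    (H : ∀ p ∈ rules, ∀ n < block.length, ¬ pvCompat p.1 (block.drop n)) (X : List Char) :
    pvScan rules (block ++ X) = block ++ pvScan rules X := by
  induction block with
  | nil => simp
  | cons b bl ih =>
    have hnone : rules.find? (fun p => !p.1.isEmpty && p.1.isPrefixOf (b :: (bl ++ X))) = none := by
      rw [List.find?_eq_none]
      intro p hp
      simp only [Bool.and_eq_true, Bool.not_eq_eq_eq_not, Bool.not_true, List.isEmpty_eq_false_iff,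
        List.isPrefixOf_iff_prefix, not_and]
      intro _ hpre
      exact H p hp 0 (by simp) (by simpa using pv_prefix_append_cases p.1 (b :: bl) X hpre)
    rw [List.cons_append, pvScan_cons_none rules b (bl ++ X) hnone,
      ih (fun p hp n hn => by simpa using H p hp (n + 1) (by simpa using hn))]
    rfl

-- replacements never create a new match of k at an existing boundary
lemma pvScan_no_new_match (P : List (List Char × List Char)) (k : List Char)
    (H : ∀ p ∈ P, ∀ n < k.length, ¬ pvCompat (k.drop n) p.2) :
    ∀ (fuel : ℕ) (cs : List Char), cs.length ≤ fuel →
      ∀ n, k.drop n <+: pvScan P cs → k.drop n <+: cs := by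
  intro fuel
  induction fuel with
  | zero =>
    intro cs hcs n h
    rw [List.length_eq_zero_iff.mp (Nat.le_zero.mp hcs)] at h ⊢
    rwa [pvScan_nil] at h
  | succ fuel ih =>
    intro cs hcs n h
    by_cases hn : k.length ≤ n
    · rw [List.drop_eq_nil_of_le hn]
      exact List.nil_prefix
    · push_neg at hn
      match cs with
      | [] => rwa [pvScan_nil] at h
      | c :: t =>
        cases hfind : P.find? (fun p => !p.1.isEmpty && p.1.isPrefixOf (c :: t)) with
        | some p =>
          rw [pvScan_eq_some P (c :: t) p hfind] at h
          exact absurd (pv_prefix_append_cases _ _ _ h)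
            (H p (List.mem_of_find?_eq_some hfind) n hn)
        | none =>
          rw [pvScan_cons_none P c t hfind] at h
          rw [List.drop_eq_getElem_cons hn] at h ⊢
          rw [List.cons_prefix_cons] at h ⊢
          exact ⟨h.1, ih t (by simpa using Nat.succ_le_succ_iff.mp (by simpa using hcs)) (n + 1)
            (by simpa using h.2)⟩

-- merging one more rule into the scan
lemma pvScan_merge (P : List (List Char × List Char)) (k r : List Char)
    (Hk : k ≠ [])
    (Hskip_r : ∀ p ∈ P, ∀ n < p.2.length, ¬ pvCompat k (p.2.drop n))
    (HC2 : ∀ p ∈ P, ∀ n < k.length, ¬ pvCompat (k.drop n) p.2)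
    (Hskip_k : ∀ p ∈ P, ∀ n < k.length, ¬ pvCompat p.1 (k.drop n)) :
    ∀ (fuel : ℕ) (cs : List Char), cs.length ≤ fuel →
      pvScan [(k, r)] (pvScan P cs) = pvScan (P ++ [(k, r)]) cs := by
  intro fuel
  induction fuel with
  | zero =>
    intro cs hcs
    rw [List.length_eq_zero_iff.mp (Nat.le_zero.mp hcs)]
    rw [pvScan_nil, pvScan_nil, pvScan_nil]
  | succ fuel ih =>
    intro cs hcs
    match cs with
    | [] => rw [pvScan_nil, pvScan_nil, pvScan_nil]
    | c :: t =>
      cases hfind : P.find? (fun p => !p.1.isEmpty && p.1.isPrefixOf (c :: t)) with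
      | some p =>
        have hmem := List.mem_of_find?_eq_some hfind
        have hp := List.find?_some hfind
        simp only [Bool.and_eq_true, Bool.not_eq_eq_eq_not, Bool.not_true,
          List.isEmpty_eq_false_iff, List.isPrefixOf_iff_prefix] at hp
        have h1 : 1 ≤ p.1.length := List.length_pos_iff.mpr hp.1
        rw [pvScan_eq_some P (c :: t) p hfind]
        rw [pvScan_block [(k, r)] p.2
          (by intro q hq n hn; rw [List.mem_singleton] at hq; subst hq
              exact Hskip_r p hmem n hn)]
        rw [ih ((c :: t).drop p.1.length)
          (by simp only [List.length_cons] at hcs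
              simp only [List.length_drop, List.length_cons]; omega)]
        rw [pvScan_eq_some (P ++ [(k, r)]) (c :: t) p (by rw [List.find?_append, hfind]; rfl)]
      | none =>
        by_cases hk : k <+: c :: t
        · obtain ⟨rest, hrest⟩ := hk
          have hlenk : 1 ≤ k.length := List.length_pos_iff.mpr Hk
          have hlen : k.length + rest.length = t.length + 1 := by
            have := congrArg List.length hrest
            simpa using this
          rw [← hrest]
          rw [pvScan_block P k (fun p hp n hn => Hskip_k p hp n hn)]
          have hpred : (fun p : List Char × List Char => !p.1.isEmpty && p.1.isPrefixOf (k ++ pvScan P rest)) (k, r) = true := by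
            simp only [Bool.and_eq_true, Bool.not_eq_eq_eq_not, Bool.not_true,
              List.isEmpty_eq_false_iff, List.isPrefixOf_iff_prefix]
            exact ⟨Hk, List.prefix_append k (pvScan P rest)⟩
          rw [pvScan_eq_some [(k, r)] (k ++ pvScan P rest) (k, r) (pv_find?_pos _ _ _ hpred)]
          rw [List.drop_left]
          rw [ih rest (by simp only [List.length_cons] at hcs; omega)]
          have hpred2 : (fun p : List Char × List Char => !p.1.isEmpty && p.1.isPrefixOf (k ++ rest)) (k, r) = true := by
            simp only [Bool.and_eq_true, Bool.not_eq_eq_eq_not, Bool.not_true,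
              List.isEmpty_eq_false_iff, List.isPrefixOf_iff_prefix]
            exact ⟨Hk, List.prefix_append k rest⟩
          rw [pvScan_eq_some (P ++ [(k, r)]) (k ++ rest) (k, r)
            (by rw [← hrest] at hfind
                rw [List.find?_append, hfind, Option.none_or, pv_find?_pos _ _ _ hpred2])]
          rw [List.drop_left]
        · rw [pvScan_cons_none P c t hfind]
          have hnew : ¬ k <+: c :: pvScan P t := by
            intro hpre
            apply hk
            have := pvScan_no_new_match P k HC2 (t.length + 1) (c :: t) (by simp) 0
            simp only [List.drop_zero] at this
            exact this (by rwa [pvScan_cons_none P c t hfind])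
          have hnone1 : ([(k, r)] : List (List Char × List Char)).find?
              (fun p => !p.1.isEmpty && p.1.isPrefixOf (c :: pvScan P t)) = none := by
            rw [List.find?_eq_none]
            intro p hp
            rw [List.mem_singleton] at hp; subst hp
            simp only [Bool.and_eq_true, Bool.not_eq_eq_eq_not, Bool.not_true,
              List.isEmpty_eq_false_iff, List.isPrefixOf_iff_prefix, not_and]
            intro _ hpre
            exact hnew hpre
          rw [pvScan_cons_none [(k, r)] c (pvScan P t) hnone1]
          rw [ih t (by simpa using Nat.succ_le_succ_iff.mp (by simpa using hcs))]
          have hnone2 : (P ++ [(k, r)]).find?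
              (fun p => !p.1.isEmpty && p.1.isPrefixOf (c :: t)) = none := by
            rw [List.find?_append, hfind, Option.none_or, List.find?_eq_none]
            intro p hp
            rw [List.mem_singleton] at hp; subst hp
            simp only [Bool.and_eq_true, Bool.not_eq_eq_eq_not, Bool.not_true,
              List.isEmpty_eq_false_iff, List.isPrefixOf_iff_prefix, not_and]
            intro _ hpre
            exact hk hpre
          rw [pvScan_cons_none (P ++ [(k, r)]) c t hnone2]

-- Python's str.replace (leftmost, restart after the replacement) is the one-rule scan
lemma pv_go_eq_scan (old new : List Char) (h : old ≠ []) :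
    ∀ (fuel : ℕ) (l acc : List Char), l.length ≤ fuel →
      PySem.Chars.replace.go old new fuel l acc = acc.reverse ++ pvScan [(old, new)] l := by
  have hlen : 1 ≤ old.length := List.length_pos_iff.mpr h
  intro fuel
  induction fuel with
  | zero =>
    intro l acc hl
    rw [List.length_eq_zero_iff.mp (Nat.le_zero.mp hl)]
    rw [pvScan_nil]
    simp [PySem.Chars.replace.go]
  | succ fuel ih =>
    intro l acc hl
    match l with
    | [] =>
      rw [pvScan_nil]
      simp [PySem.Chars.replace.go]
    | c :: t =>
      rw [PySem.Chars.replace.go]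
      by_cases hpre : old.isPrefixOf (c :: t)
      · simp only [hpre, if_true]
        rw [ih ((c :: t).drop old.length) (new.reverse ++ acc)
          (by simp only [List.length_drop, List.length_cons]
              simp only [List.length_cons] at hl; omega)]
        have hpred : (fun p : List Char × List Char => !p.1.isEmpty && p.1.isPrefixOf (c :: t)) (old, new) = true := by
          simp only [Bool.and_eq_true, Bool.not_eq_eq_eq_not, Bool.not_true,
            List.isEmpty_eq_false_iff]
          exact ⟨h, hpre⟩
        rw [pvScan_eq_some [(old, new)] (c :: t) (old, new) (pv_find?_pos _ _ _ hpred)]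
        simp
      · simp only [hpre, if_false, Bool.false_eq_true]
        rw [ih t (c :: acc) (by simpa using Nat.succ_le_succ_iff.mp (by simpa using hl))]
        have hnone : ([(old, new)] : List (List Char × List Char)).find?
            (fun p => !p.1.isEmpty && p.1.isPrefixOf (c :: t)) = none := by
          rw [List.find?_eq_none]
          intro p hp
          rw [List.mem_singleton] at hp; subst hp
          simp only [Bool.and_eq_true, Bool.not_eq_eq_eq_not, Bool.not_true,
            List.isEmpty_eq_false_iff, not_and]
          intro _ hp2
          exact absurd hp2 hpre
        rw [pvScan_cons_none [(old, new)] c t hnone]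
        simp

lemma pv_replace_eq_scan (old new : List Char) (h : old ≠ []) (s : List Char) :
    PySem.Chars.replace s old new = pvScan [(old, new)] s := by
  have hemp : old.isEmpty = false := by rw [List.isEmpty_eq_false_iff]; exact h
  rw [PySem.Chars.replace, hemp]
  simp only [Bool.false_eq_true, if_false]
  simpa using pv_go_eq_scan old new h s.length s [] le_rfl

-- the composite of the five replaces is the five-rule scan
lemma pv_chain (cs : List Char) :
    PySem.Chars.replace (PySem.Chars.replace (PySem.Chars.replace (PySem.Chars.replace
      (PySem.Chars.replace cs "ethers.utils.parseEther(".toList "ethers.parseEther(".toList)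
      "ethers.utils.formatEther(".toList "ethers.formatEther(".toList)
      "ethers.utils.parseUnits(".toList "ethers.parseUnits(".toList)
      "ethers.utils.formatUnits(".toList "ethers.formatUnits(".toList)
      ".deployed()".toList ".waitForDeployment()".toList
    = pvScan pvRules cs := by
  rw [pv_replace_eq_scan _ _ (by decide) cs]
  rw [pv_replace_eq_scan _ _ (by decide), pv_replace_eq_scan _ _ (by decide),
    pv_replace_eq_scan _ _ (by decide), pv_replace_eq_scan _ _ (by decide)]
  rw [pvScan_merge _ _ _ (by decide) (by simp only [pvCompat]; decide) (by simp only [pvCompat]; decide) (by simp only [pvCompat]; decide) cs.length cs le_rfl]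
  rw [pvScan_merge _ _ _ (by decide) (by simp only [pvCompat]; decide) (by simp only [pvCompat]; decide) (by simp only [pvCompat]; decide) cs.length cs le_rfl]
  rw [pvScan_merge _ _ _ (by decide) (by simp only [pvCompat]; decide) (by simp only [pvCompat]; decide) (by simp only [pvCompat]; decide) cs.length cs le_rfl]
  rw [pvScan_merge _ _ _ (by decide) (by simp only [pvCompat]; decide) (by simp only [pvCompat]; decide) (by simp only [pvCompat]; decide) cs.length cs le_rfl]
  rfl

-- ===== VERDICT (by name: the statement is the Claim_ definition above) =====
theorem normalize_ethers_v6_py_spec : Claim_equal_normalize_ethers_v6_py := by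
  intro code _
  unfold Spec_normalize_ethers_v6_py normalize_ethers_v6_py normalize_ethers_v6_py_alt
  by_cases h : code = ""
  · simp [h]
  · simp only [if_neg h]
    simp only [pvReplacements, List.foldl_cons, List.foldl_nil]
    simp only [PySem.Str.replace, String.toList_ofList]
    exact congrArg String.ofList (pv_chain code.toList)
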